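-- pv_equiv track=rewrite | github.com/Irfanwustl/Research_code | support/Bisulfite_conversion_rate/Bilge_downstream/fix_rows.py | get_cols
-- ===== SOURCE A (Python) =====
-- def get_cols(lst):
--     header = []
--     row = []
--     rc3_seen = False
--     for col in lst:
--         col = str(col)
--         if 'rc3' in col:
--             val1 = col[:3]
--             val2 = col[3:]
--             header.append(val1)
--             row.append(val2)
--             rc3_seen = True
--         if rc3_seen and 'rc3' not in col:
--             row.append(col)
--         elif not rc3_seen:
--             header.append(col)
--     rows = []
--     rows.append(row)
--     return header, rows
-- ===== SOURCE B (Python) =====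
-- def get_cols(lst):
--     strs = [str(c) for c in lst]
--     idx = len(strs)
--     for i, s in enumerate(strs):
--         if 'rc3' in s:
--             idx = i
--             break
--     header = strs[:idx] + [s[:3] for s in strs[idx:] if 'rc3' in s]
--     row = [s[3:] if 'rc3' in s else s for s in strs[idx:]]
--     return header, [row]
-- ===== Notes on version B (the rewrite author's own statement) =====
-- stated objective: alternative
-- what changed: Replaces A's single flag-driven loop with mutable header/row/seen state by a find-first-'rc3'-marker step followed by two independent comprehensions over the prefix and suffix.
import Mathlib
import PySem

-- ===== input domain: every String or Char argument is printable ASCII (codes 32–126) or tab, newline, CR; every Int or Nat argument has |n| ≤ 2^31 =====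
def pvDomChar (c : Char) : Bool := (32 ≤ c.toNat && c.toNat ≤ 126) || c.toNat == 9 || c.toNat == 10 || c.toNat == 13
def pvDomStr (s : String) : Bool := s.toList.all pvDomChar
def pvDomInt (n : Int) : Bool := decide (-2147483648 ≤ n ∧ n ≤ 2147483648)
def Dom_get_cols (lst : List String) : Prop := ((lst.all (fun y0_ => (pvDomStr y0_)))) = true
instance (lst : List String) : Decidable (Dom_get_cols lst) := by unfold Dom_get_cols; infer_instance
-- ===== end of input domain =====

-- B replaces A's flag-driven accumulator loop by find-first-marker plus two comprehensions; alternative decomposition, same cost.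

-- shared helpers: the 'rc3' in col test and the col[:3] / col[3:] slices
def hitRc3 (s : String) : Bool := PySem.Str.isIn "rc3" s
def take3 (s : String) : String := PySem.Str.slice s none (some 3)
def drop3 (s : String) : String := PySem.Str.slice s (some 3) none

-- ===== PORT A =====
-- one pass, state (header, row, rc3_seen); str(col) is the identity on String inputs
-- the loop body, named (one iteration of A's for-loop over state (header, row, rc3_seen))
def stepA (st : List String × List String × Bool) (col : String) : List String × List String × Bool :=
  let header := st.1
  let row := st.2.1
  let seen := st.2.2
  let header := if hitRc3 col then header ++ [take3 col] else header
  let row := if hitRc3 col then row ++ [drop3 col] else row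
  let seen := if hitRc3 col then true else seen
  if seen && !(hitRc3 col) then (header, row ++ [col], seen)
  else if !seen then (header ++ [col], row, seen)
  else (header, row, seen)

def get_cols (lst : List String) : List String × List (List String) :=
  let st := lst.foldl stepA ([], [], false)
  (st.1, [st.2.1])

-- ===== PORT B =====
-- find the first 'rc3' index (len if absent); strs[:idx]/strs[idx:] with a Nat idx ≤ len are take/drop
def get_cols_alt (lst : List String) : List String × List (List String) :=
  let idx := match lst.findIdx? hitRc3 with
    | some i => i
    | none => lst.length
  let header := lst.take idx ++ ((lst.drop idx).filter hitRc3).map take3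
  let row := (lst.drop idx).map (fun s => if hitRc3 s then drop3 s else s)
  (header, [row])

-- ===== PRECONDITION & SPEC =====
def Spec_get_cols (lst : List String) (out : List String × List (List String)) : Prop := out = get_cols_alt lst
instance (lst : List String) (out : List String × List (List String)) : Decidable (Spec_get_cols lst out) := by unfold Spec_get_cols; infer_instance

-- ===== CLAIM (what is proved, stated in full; the proofs are below) =====
def Claim_equal_get_cols : Prop := ∀ (lst : List String), Dom_get_cols lst → Spec_get_cols lst (get_cols lst)

-- ===== LEMMAS AND PROOFS =====

theorem loopA_true (lst : List String) (h r : List String) :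
    lst.foldl stepA (h, r, true) =
      (h ++ (lst.filter hitRc3).map take3,
       r ++ lst.map (fun s => if hitRc3 s then drop3 s else s), true) := by
  induction lst generalizing h r with
  | nil => simp
  | cons c cs ih =>
    by_cases hc : hitRc3 c = true <;>
      simp [stepA, hc, List.foldl_cons, ih]

theorem loopA_false (lst : List String) (h r : List String) :
    lst.foldl stepA (h, r, false) =
      match lst.findIdx? hitRc3 with
      | none => (h ++ lst, r, false)
      | some i =>
          (h ++ lst.take i ++ ((lst.drop i).filter hitRc3).map take3,
           r ++ (lst.drop i).map (fun s => if hitRc3 s then drop3 s else s), true) := by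
  induction lst generalizing h r with
  | nil => simp
  | cons c cs ih =>
    by_cases hc : hitRc3 c = true
    · simp [List.foldl_cons, stepA, hc, List.findIdx?_cons, loopA_true]
    · rw [List.foldl_cons]
      have : stepA (h, r, false) c = (h ++ [c], r, false) := by simp [stepA, hc]
      rw [this, ih]
      simp only [List.findIdx?_cons, hc]
      cases hfi : cs.findIdx? hitRc3 with
      | none => simp
      | some i => simp [List.take_succ_cons, List.drop_succ_cons]

-- ===== VERDICT (by name: the statement is the Claim_ definition above) =====
theorem get_cols_spec : Claim_equal_get_cols := by
  intro lst _
  unfold Spec_get_cols get_cols get_cols_alt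
  rw [loopA_false]
  cases hfi : lst.findIdx? hitRc3 with
  | none => simp
  | some i => simp
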